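-- pv_equiv track=rewrite | github.com/shayan-shm/BWT-RLE-Huffman-Compressor | advanced_compression_tool.py | create_rotations
-- ===== SOURCE A (Python) =====
-- def create_rotations(text: str) -> list[str]:
--     """Create all possible rotations with animation data"""
--     text = text + "$"
--     n = len(text)
--     rotations = []
--     for i in range(n):
--         rotation = text[i:] + text[:i]
--         # self.rotations_history.append(rotation)
--         rotations.append(rotation)
--     return rotations
-- ===== SOURCE B (Python) =====
-- def create_rotations(text: str) -> list[str]:
--     """Create all possible rotations with animation data"""
--     current = text + "$"
--     rotations = []
--     for _ in range(len(current)):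
--         rotations.append(current)
--         current = current[1:] + current[:1]
--     return rotations
-- ===== Notes on version B (the rewrite author's own statement) =====
-- stated objective: alternative
-- what changed: B maintains one running string and rotates it left by one character each iteration, instead of slicing each rotation independently from the original text.
import Mathlib
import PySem

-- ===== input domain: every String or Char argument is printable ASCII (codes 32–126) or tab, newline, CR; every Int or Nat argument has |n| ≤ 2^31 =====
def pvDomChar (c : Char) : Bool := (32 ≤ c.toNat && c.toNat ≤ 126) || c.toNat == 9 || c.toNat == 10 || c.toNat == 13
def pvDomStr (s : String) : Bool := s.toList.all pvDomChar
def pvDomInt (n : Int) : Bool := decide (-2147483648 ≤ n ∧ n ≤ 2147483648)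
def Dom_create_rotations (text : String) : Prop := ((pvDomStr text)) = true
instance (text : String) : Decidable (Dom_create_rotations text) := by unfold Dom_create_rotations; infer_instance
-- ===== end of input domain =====

-- B builds each rotation by rotating a running string left by one character instead of
-- slicing each rotation independently from the original text; same cost, different decomposition.

-- ===== PORT A =====
-- text = text + "$"; n = len(text); for i in range(n): rotations.append(text[i:] + text[:i])
def create_rotations (text : String) : List String :=
  let t : List Char := text.toList ++ ['$']
  let n : Int := (t.length : Int)
  (PySem.List.pyRange 0 n 1).foldl
    (fun rotations i =>
      rotations ++ [String.ofList (PySem.List.slice t (some i) none ++ PySem.List.slice t none (some i))])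
    []

-- ===== PORT B =====
-- the loop of Source B: k iterations; each appends the current string and rotates it left by one
def rotLoopB : Nat → List Char → List String → List String
  | 0, _, rotations => rotations
  | k+1, cur, rotations => rotLoopB k (cur.drop 1 ++ cur.take 1) (rotations ++ [String.ofList cur])

def create_rotations_alt (text : String) : List String :=
  let cur : List Char := text.toList ++ ['$']
  rotLoopB cur.length cur []

-- ===== PRECONDITION & SPEC =====
def Spec_create_rotations (text : String) (out : List String) : Prop := out = create_rotations_alt text
instance (text : String) (out : List String) : Decidable (Spec_create_rotations text out) := by unfold Spec_create_rotations; infer_instance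

-- ===== CLAIM (what is proved, stated in full; the proofs are below) =====
def Claim_equal_create_rotations : Prop := ∀ (text : String), Dom_create_rotations text → Spec_create_rotations text (create_rotations text)

-- ===== LEMMAS AND PROOFS =====

-- B's loop, started on the i-th left-rotation of t with i + k = |t|, emits rotations i, i+1, …
theorem rotLoopB_spec (t : List Char) :
    ∀ (k i : Nat) (acc : List String), i + k = t.length →
      rotLoopB k (t.drop i ++ t.take i) acc
        = acc ++ (List.range k).map (fun j => String.ofList (t.drop (i + j) ++ t.take (i + j))) := by
  intro k
  induction k with
  | zero => intro i acc _; simp [rotLoopB]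
  | succ k ih =>
    intro i acc h
    have hi : i < t.length := by omega
    have hdrop : List.drop 1 (t.drop i ++ t.take i) = t.drop (i + 1) ++ t.take i := by
      rw [List.drop_append_of_le_length (by simp; omega), List.drop_drop]
    have htake : List.take 1 (t.drop i ++ t.take i) = [t[i]] := by
      rw [List.take_append_of_le_length (by simp; omega)]
      rw [List.take_drop]
      rw [List.take_succ_eq_append_getElem hi, List.drop_append_of_le_length (by simp; omega)]
      simp
    have hrot : (t.drop i ++ t.take i).drop 1 ++ (t.drop i ++ t.take i).take 1
        = t.drop (i + 1) ++ t.take (i + 1) := by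
      rw [hdrop, htake]
      rw [List.take_succ_eq_append_getElem hi, List.append_assoc]
    show rotLoopB k _ _ = _
    rw [hrot, ih (i + 1) _ (by omega)]
    rw [List.range_succ_eq_map]
    simp [List.map_map, Function.comp]
    intro j _
    have hj : i + 1 + j = i + (j + 1) := by omega
    rw [hj]

-- ===== VERDICT (by name: the statement is the Claim_ definition above) =====
theorem create_rotations_spec : Claim_equal_create_rotations := by
  intro text _
  show create_rotations text = create_rotations_alt text
  simp only [create_rotations, create_rotations_alt]
  generalize text.toList ++ ['$'] = t
  have hB : rotLoopB t.length t [] =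
      (List.range t.length).map (fun j => String.ofList (t.drop j ++ t.take j)) := by
    have := rotLoopB_spec t t.length 0 [] (by omega)
    simpa using this
  rw [hB, PySem.List.pyRange_one]
  rw [List.foldl_map]
  rw [PySem.List.foldl_append_singleton_eq_map]
  simp only [Int.sub_zero, Int.toNat_natCast, List.nil_append]
  apply List.map_congr_left
  intro k hk
  have hk' : (0 : Int) ≤ 0 + (k : Int) := by omega
  rw [PySem.List.slice_from t hk', PySem.List.slice_to t hk']
  norm_num
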